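-- pv_equiv track=rewrite | github.com/helgefmi/aoc2019 | day24/part1.py | biodiversity_rating
-- ===== SOURCE A (Python) =====
-- from typing import List
--
-- Screen = List[str]
--
-- def biodiversity_rating(scr: Screen) -> int:
--     ret = 0
--     for y, row in enumerate(scr):
--         for x, c in enumerate(row):
--             i = y * len(scr[0]) + x
--             if c == '#':
--                 ret += 2 ** i
--     return ret
-- ===== SOURCE B (Python) =====
-- def biodiversity_rating(scr):
--     if not scr:
--         return 0
--     w = len(scr[0])
--     ret = 0
--     for y, row in enumerate(scr):
--         bits = ''.join('1' if c == '#' else '0' for c in row)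
--         if bits:
--             ret += int(bits[::-1], 2) << (y * w)
--     return ret
-- ===== Notes on version B (the rewrite author's own statement) =====
-- stated objective: idiomatic
-- what changed: B decodes each row as a binary numeral (map '#'/'.' to '1'/'0', reverse, int(...,2)) and shifts it by y*W into the accumulator, instead of A's per-cell 2**i additions.
import Mathlib
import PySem

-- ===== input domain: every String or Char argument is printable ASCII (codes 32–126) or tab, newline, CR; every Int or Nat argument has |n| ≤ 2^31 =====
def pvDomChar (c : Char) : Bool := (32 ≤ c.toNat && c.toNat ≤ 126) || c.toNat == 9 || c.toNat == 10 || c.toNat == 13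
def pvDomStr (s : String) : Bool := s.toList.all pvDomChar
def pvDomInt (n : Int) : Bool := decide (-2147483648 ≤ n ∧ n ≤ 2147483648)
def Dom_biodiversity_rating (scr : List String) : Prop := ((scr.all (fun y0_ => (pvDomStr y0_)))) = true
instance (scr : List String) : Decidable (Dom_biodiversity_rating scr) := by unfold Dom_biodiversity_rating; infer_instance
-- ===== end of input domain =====

-- B builds the result per row (binary-numeral decode of the row, shifted by y*W) instead of A's per-cell 2**i sum; objective: more idiomatic decomposition, same cost.

-- ===== PORT A =====
def biodiversity_rating (scr : List String) : Int :=
  (PySem.List.enumerate scr).foldl (fun ret yrow =>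
    (PySem.List.enumerate yrow.2.toList).foldl (fun ret xc =>
      let i := yrow.1 * (((PySem.List.pyGet? scr 0).getD "").length : Int) + xc.1
      if xc.2 = '#' then ret + 2 ^ i.toNat else ret) ret) 0

-- ===== PORT B =====
-- int(s, 2) for a nonempty string of '0'/'1' characters (exact on that domain; B only calls it there)
def pyIntBin (cs : List Char) : Int :=
  cs.foldl (fun a c => 2 * a + (if c = '1' then 1 else 0)) 0

def biodiversity_rating_alt (scr : List String) : Int :=
  match scr with
  | [] => 0
  | r0 :: _ =>
    (PySem.List.enumerate scr).foldl (fun ret yrow =>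
      let bits := yrow.2.toList.map (fun c => if c = '#' then '1' else '0')
      if bits ≠ [] then
        ret + pyIntBin bits.reverse * 2 ^ (yrow.1 * (r0.length : Int)).toNat
      else ret) 0

-- ===== PRECONDITION & SPEC =====
def Spec_biodiversity_rating (scr : List String) (out : Int) : Prop := out = biodiversity_rating_alt scr
instance (scr : List String) (out : Int) : Decidable (Spec_biodiversity_rating scr out) := by unfold Spec_biodiversity_rating; infer_instance

-- ===== CLAIM (what is proved, stated in full; the proofs are below) =====
def Claim_equal_biodiversity_rating : Prop := ∀ (scr : List String), Dom_biodiversity_rating scr → Spec_biodiversity_rating scr (biodiversity_rating scr)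

-- ===== LEMMAS AND PROOFS =====

-- value of a row read with the head character as the least-significant bit
def binval : List Char → Int
  | [] => 0
  | c :: cs => (if c = '#' then 1 else 0) + 2 * binval cs

def specSum (w : Nat) : List String → Nat → Int
  | [], _ => 0
  | r :: rs, y => 2 ^ (y * w) * binval r.toList + specSum w rs (y + 1)

theorem pyIntBin_snoc (cs : List Char) (c : Char) :
    pyIntBin (cs ++ [c]) = 2 * pyIntBin cs + (if c = '1' then 1 else 0) := by
  simp [pyIntBin, List.foldl_append]

theorem pyIntBin_rev_map (cs : List Char) :
    pyIntBin ((cs.map (fun c => if c = '#' then '1' else '0')).reverse) = binval cs := by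
  induction cs with
  | nil => simp [pyIntBin, binval]
  | cons c cs ih =>
    simp only [List.map_cons, List.reverse_cons, pyIntBin_snoc, ih, binval]
    by_cases h : c = '#' <;> simp [h] <;> try ring

theorem inner_fold (cs : List Char) (base : Nat) : ∀ (s : Nat) (ret : Int),
    (PySem.List.enumerate cs (s : Int)).foldl (fun r xc =>
        if xc.2 = '#' then r + 2 ^ (((base : Int)) + xc.1).toNat else r) ret
      = ret + 2 ^ (base + s) * binval cs := by
  induction cs with
  | nil => intro s ret; simp [PySem.List.enumerate_nil, binval]
  | cons c cs ih =>
    intro s ret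
    have hcast : ((s : Int) + 1) = ((s + 1 : Nat) : Int) := by push_cast; ring
    have htn : (((base : Int)) + (s : Int)).toNat = base + s := by omega
    simp only [PySem.List.enumerate_cons, List.foldl_cons, hcast, ih, binval, htn]
    by_cases h : c = '#' <;> simp [h] <;> try ring

theorem outer_fold_A (w : Nat) (rows : List String) : ∀ (y : Nat) (ret : Int),
    (PySem.List.enumerate rows (y : Int)).foldl (fun ret yrow =>
      (PySem.List.enumerate yrow.2.toList).foldl (fun r xc =>
        if xc.2 = '#' then r + 2 ^ (yrow.1 * (w : Int) + xc.1).toNat else r) ret) ret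
      = ret + specSum w rows y := by
  induction rows with
  | nil => intro y ret; simp [PySem.List.enumerate_nil, specSum]
  | cons r rs ih =>
    intro y ret
    have hcast : ((y : Int) + 1) = ((y + 1 : Nat) : Int) := by push_cast; ring
    have hmul : (y : Int) * (w : Int) = ((y * w : Nat) : Int) := by push_cast; ring
    simp only [PySem.List.enumerate_cons, List.foldl_cons, hcast, ih, specSum, hmul]
    have := inner_fold r.toList (y * w) 0 ret
    simp only [Nat.cast_zero] at this
    rw [this]
    simp only [Nat.add_zero]
    ring

theorem outer_fold_B (w : Nat) (rows : List String) : ∀ (y : Nat) (ret : Int),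
    (PySem.List.enumerate rows (y : Int)).foldl (fun ret yrow =>
      let bits := yrow.2.toList.map (fun c => if c = '#' then '1' else '0')
      if bits ≠ [] then
        ret + pyIntBin bits.reverse * 2 ^ (yrow.1 * ((w : Nat) : Int)).toNat
      else ret) ret
      = ret + specSum w rows y := by
  induction rows with
  | nil => intro y ret; simp [PySem.List.enumerate_nil, specSum]
  | cons r rs ih =>
    intro y ret
    have hcast : ((y : Int) + 1) = ((y + 1 : Nat) : Int) := by push_cast; ring
    have htn : ((y : Int) * (w : Int)).toNat = y * w := by
      have : (y : Int) * (w : Int) = ((y * w : Nat) : Int) := by push_cast; ring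
      omega
    simp only [PySem.List.enumerate_cons, List.foldl_cons, hcast, ih, specSum]
    by_cases h : r.toList = []
    · simp [h, binval]
    · have hne : r.toList.map (fun c => if c = '#' then '1' else '0') ≠ [] := by
        simpa using h
      simp only [hne, if_pos, pyIntBin_rev_map, htn, ne_eq, not_false_eq_true]
      ring

-- ===== VERDICT (by name: the statement is the Claim_ definition above) =====
theorem biodiversity_rating_spec : Claim_equal_biodiversity_rating := by
  intro scr _
  unfold Spec_biodiversity_rating biodiversity_rating biodiversity_rating_alt
  cases scr with
  | nil => simp [PySem.List.enumerate_nil]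
  | cons r0 rs =>
    have hget : PySem.List.pyGet? (r0 :: rs) 0 = some r0 := PySem.List.pyGet?_zero_cons _ _
    rw [hget]
    have hA := outer_fold_A r0.length (r0 :: rs) 0 0
    have hB := outer_fold_B r0.length (r0 :: rs) 0 0
    simp only [Nat.cast_zero] at hA hB
    simp only [Option.getD_some] at *
    rw [hA, hB]
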